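-- pv_equiv track=rewrite | github.com/lavelock67/universal_symantics | nsm_pivot_cleaner.py | _is_reported_speech
-- ===== SOURCE A (Python) =====
-- def _is_reported_speech(content: str) -> bool:
--     """Check if content represents reported speech."""
--     # Simple heuristics for reported speech
--     reported_indicators = [
--         'said', 'told', 'asked', 'replied', 'answered', 'explained',
--         'dijo', 'contó', 'preguntó', 'respondió', 'explicó',
--         'dit', 'raconté', 'demanda', 'répondit', 'expliqua'
--     ]
--
--     content_lower = content.lower()
--     return any(indicator in content_lower for indicator in reported_indicators)
-- ===== SOURCE B (Python) =====
-- # Reported-speech indicator words (English, Spanish, French), same set as the original.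
-- _INDICATORS = ("said told asked replied answered explained "
--                "dijo contó preguntó respondió explicó "
--                "dit raconté demanda répondit expliqua").split()
--
--
-- def _is_reported_speech(content: str) -> bool:
--     """Check if content represents reported speech (single left-to-right scan)."""
--     text = content.lower()
--     for i in range(len(text) + 1):
--         for ind in _INDICATORS:
--             if text.startswith(ind, i):
--                 return True
--     return False
-- ===== Notes on version B (the rewrite author's own statement) =====
-- stated objective: alternative
-- what changed: Replaces 16 independent substring-containment scans of the lowered text with a single left-to-right scan that checks at each position whether any indicator starts there (prefix test per position).
import Mathlib
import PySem

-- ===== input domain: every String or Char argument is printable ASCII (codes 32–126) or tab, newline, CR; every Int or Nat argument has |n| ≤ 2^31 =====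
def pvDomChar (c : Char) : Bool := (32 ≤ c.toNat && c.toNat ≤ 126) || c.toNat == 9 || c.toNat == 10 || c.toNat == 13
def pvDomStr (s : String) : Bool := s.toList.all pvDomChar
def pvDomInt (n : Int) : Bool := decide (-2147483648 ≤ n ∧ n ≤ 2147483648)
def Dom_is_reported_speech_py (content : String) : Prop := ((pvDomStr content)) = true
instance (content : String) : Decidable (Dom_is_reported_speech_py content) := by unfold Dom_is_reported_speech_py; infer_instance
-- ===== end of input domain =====

-- B replaces A's 16 independent substring scans with one left-to-right scan testing
-- every position for an indicator prefix (objective: alternative algorithm, same cost).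

-- ===== PORT A =====
-- the reported_indicators list of A
def reportedIndicators : List String :=
  ["said", "told", "asked", "replied", "answered", "explained",
   "dijo", "contó", "preguntó", "respondió", "explicó",
   "dit", "raconté", "demanda", "répondit", "expliqua"]

def is_reported_speech_py (content : String) : Bool :=
  let contentLower := PySem.Str.lower content
  reportedIndicators.any (fun indicator => PySem.Str.isIn indicator contentLower)

-- ===== PORT B =====
-- B's indicator list, as character lists (B scans characters)
def altIndicators : List (List Char) :=
  ["said".toList, "told".toList, "asked".toList, "replied".toList, "answered".toList,
   "explained".toList, "dijo".toList, "contó".toList, "preguntó".toList,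
   "respondió".toList, "explicó".toList, "dit".toList, "raconté".toList,
   "demanda".toList, "répondit".toList, "expliqua".toList]

-- B's outer loop over positions i: one pass over the suffixes of the lowered text,
-- at each position testing whether some indicator starts there (text.startswith(ind, i))
def altScan (inds : List (List Char)) : List Char → Bool
  | [] => inds.any (fun ind => ind.isPrefixOf [])
  | c :: t => inds.any (fun ind => ind.isPrefixOf (c :: t)) || altScan inds t

def is_reported_speech_py_alt (content : String) : Bool :=
  altScan altIndicators (PySem.Chars.lower content.toList)

-- ===== PRECONDITION & SPEC =====
def Spec_is_reported_speech_py (content : String) (out : Bool) : Prop := out = is_reported_speech_py_alt content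
instance (content : String) (out : Bool) : Decidable (Spec_is_reported_speech_py content out) := by unfold Spec_is_reported_speech_py; infer_instance

-- ===== CLAIM (what is proved, stated in full; the proofs are below) =====
def Claim_equal_is_reported_speech_py : Prop := ∀ (content : String), Dom_is_reported_speech_py content → Spec_is_reported_speech_py content (is_reported_speech_py content)

-- ===== LEMMAS AND PROOFS =====

-- B's scan finds exactly the indicators that occur as an infix of the text
theorem altScan_iff (inds : List (List Char)) (cs : List Char) :
    altScan inds cs = true ↔ ∃ l ∈ inds, l <:+: cs := by
  induction cs with
  | nil =>
      simp [altScan, List.any_eq_true, List.isPrefixOf_iff_prefix]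
  | cons c t ih =>
      simp only [altScan, Bool.or_eq_true, List.any_eq_true, List.isPrefixOf_iff_prefix, ih]
      constructor
      · rintro (⟨l, hl, hp⟩ | ⟨l, hl, hi⟩)
        · exact ⟨l, hl, hp.isInfix⟩
        · exact ⟨l, hl, hi.trans (t.suffix_cons c).isInfix⟩
      · rintro ⟨l, hl, hi⟩
        rcases (List.infix_cons_iff).mp hi with hp | hi'
        · exact Or.inl ⟨l, hl, hp⟩
        · exact Or.inr ⟨l, hl, hi'⟩

-- A's indicator strings are B's character lists
theorem indicators_map : reportedIndicators.map String.toList = altIndicators := rfl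

-- ===== VERDICT (by name: the statement is the Claim_ definition above) =====
theorem is_reported_speech_py_spec : Claim_equal_is_reported_speech_py := by
  intro content _
  unfold Spec_is_reported_speech_py
  unfold is_reported_speech_py is_reported_speech_py_alt
  rw [Bool.eq_iff_iff, altScan_iff]
  rw [← indicators_map]
  simp only [List.any_eq_true, PySem.Str.isIn_iff_infix, List.mem_map]
  constructor
  · rintro ⟨s, hs, hi⟩
    exact ⟨s.toList, ⟨s, hs, rfl⟩, by simpa [PySem.Str.lower] using hi⟩
  · rintro ⟨l, ⟨s, hs, rfl⟩, hi⟩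
    exact ⟨s, hs, by simpa [PySem.Str.lower] using hi⟩
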